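-- pv_equiv track=rewrite | github.com/lyquangdieu2022az-maker/livessub | app/main.py | _language_matches
-- ===== SOURCE A (Python) =====
-- def _language_matches(target_language: str, detected_language: str | None) -> bool:
--     if not detected_language:
--         return False
--
--     target = target_language.strip().lower()
--     aliases = {
--         "vi": {"vi", "vie", "vietnamese", "tieng viet"},
--         "en": {"en", "eng", "english", "tieng anh"},
--         "ja": {"ja", "jpn", "japanese", "tieng nhat"},
--         "ko": {"ko", "kor", "korean", "tieng han"},
--         "zh": {"zh", "zho", "chi", "chinese", "tieng trung"},
--     }
--
--     normalized_detected = detected_language.lower()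
--     for values in aliases.values():
--         if normalized_detected in values and target in values:
--             return True
--     return normalized_detected == target
-- ===== SOURCE B (Python) =====
-- _ALIAS_GROUPS = [
--     ("vi", ("vi", "vie", "vietnamese", "tieng viet")),
--     ("en", ("en", "eng", "english", "tieng anh")),
--     ("ja", ("ja", "jpn", "japanese", "tieng nhat")),
--     ("ko", ("ko", "kor", "korean", "tieng han")),
--     ("zh", ("zh", "zho", "chi", "chinese", "tieng trung")),
-- ]
-- # one flat alias -> canonical-code map, built once
-- _ALIAS_TO_CODE = {alias: code for code, aliases in _ALIAS_GROUPS for alias in aliases}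
--
--
-- def _language_matches(target_language: str, detected_language: str | None) -> bool:
--     if not detected_language:
--         return False
--     target = target_language.strip().lower()
--     detected = detected_language.lower()
--     # canonicalise both sides (a non-alias string stays itself) and compare
--     return _ALIAS_TO_CODE.get(detected, detected) == _ALIAS_TO_CODE.get(target, target)
-- ===== Notes on version B (the rewrite author's own statement) =====
-- stated objective: simpler
-- what changed: Replaces the per-group loop testing both strings against each alias set with a single flat alias-to-canonical-code dict built once; the function body becomes one guarded comparison of the two canonicalised strings (a non-alias string canonicalises to itself, so the equality fallback is subsumed).
import Mathlib
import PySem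

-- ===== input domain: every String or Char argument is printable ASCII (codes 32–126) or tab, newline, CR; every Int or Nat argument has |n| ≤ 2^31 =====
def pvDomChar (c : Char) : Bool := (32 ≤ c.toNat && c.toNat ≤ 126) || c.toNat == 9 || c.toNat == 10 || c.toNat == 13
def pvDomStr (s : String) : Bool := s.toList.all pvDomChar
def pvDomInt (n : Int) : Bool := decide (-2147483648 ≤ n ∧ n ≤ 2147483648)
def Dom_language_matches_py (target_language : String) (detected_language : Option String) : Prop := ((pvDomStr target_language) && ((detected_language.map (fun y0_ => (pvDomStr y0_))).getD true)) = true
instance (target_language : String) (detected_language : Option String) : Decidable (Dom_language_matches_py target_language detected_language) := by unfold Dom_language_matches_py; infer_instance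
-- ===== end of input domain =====

-- B replaces A's loop over alias groups by one flat alias→code map and a single
-- comparison of the two canonicalised strings (objective: simpler).

-- ===== PORT A =====
-- the literal `aliases` dict of A: code -> set of alias strings
def pvAliasesA : PySem.Dict String (PySem.Set String) :=
  PySem.Dict.mk [
    ("vi", PySem.Set.ofList ["vi", "vie", "vietnamese", "tieng viet"]),
    ("en", PySem.Set.ofList ["en", "eng", "english", "tieng anh"]),
    ("ja", PySem.Set.ofList ["ja", "jpn", "japanese", "tieng nhat"]),
    ("ko", PySem.Set.ofList ["ko", "kor", "korean", "tieng han"]),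
    ("zh", PySem.Set.ofList ["zh", "zho", "chi", "chinese", "tieng trung"])]

-- A's `for values in aliases.values(): if … return True` loop, then the fallback
def pvLoopA (nd target : String) : List (PySem.Set String) → Bool
  | [] => nd == target
  | v :: rest =>
      if PySem.Set.contains v nd && PySem.Set.contains v target then true
      else pvLoopA nd target rest

def language_matches_py (target_language : String) (detected_language : Option String) : Bool :=
  match detected_language with
  | none => false
  | some d =>
    if d = "" then false
    else
      let target := PySem.Str.lower (PySem.Str.strip target_language)
      let nd := PySem.Str.lower d
      pvLoopA nd target pvAliasesA.values

-- ===== PORT B =====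
-- the flat alias -> canonical-code dict B builds once
def pvAliasToCode : PySem.Dict String String :=
  PySem.Dict.mk [
    ("vi", "vi"), ("vie", "vi"), ("vietnamese", "vi"), ("tieng viet", "vi"),
    ("en", "en"), ("eng", "en"), ("english", "en"), ("tieng anh", "en"),
    ("ja", "ja"), ("jpn", "ja"), ("japanese", "ja"), ("tieng nhat", "ja"),
    ("ko", "ko"), ("kor", "ko"), ("korean", "ko"), ("tieng han", "ko"),
    ("zh", "zh"), ("zho", "zh"), ("chi", "zh"), ("chinese", "zh"), ("tieng trung", "zh")]

def language_matches_py_alt (target_language : String) (detected_language : Option String) : Bool :=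
  match detected_language with
  | none => false
  | some d =>
    if d = "" then false
    else
      let target := PySem.Str.lower (PySem.Str.strip target_language)
      let nd := PySem.Str.lower d
      (pvAliasToCode.getD nd nd) == (pvAliasToCode.getD target target)

-- ===== PRECONDITION & SPEC =====
def Spec_language_matches_py (target_language : String) (detected_language : Option String) (out : Bool) : Prop := out = language_matches_py_alt target_language detected_language
instance (target_language : String) (detected_language : Option String) (out : Bool) : Decidable (Spec_language_matches_py target_language detected_language out) := by unfold Spec_language_matches_py; infer_instance

-- ===== CLAIM (what is proved, stated in full; the proofs are below) =====
def Claim_equal_language_matches_py : Prop := ∀ (target_language : String) (detected_language : Option String), Dom_language_matches_py target_language detected_language → Spec_language_matches_py target_language detected_language (language_matches_py target_language detected_language)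

-- ===== LEMMAS AND PROOFS =====
-- all alias strings (used only by the proofs, for the case split)
def pvAllAliases : List String :=
  ["vi", "vie", "vietnamese", "tieng viet",
   "en", "eng", "english", "tieng anh",
   "ja", "jpn", "japanese", "tieng nhat",
   "ko", "kor", "korean", "tieng han",
   "zh", "zho", "chi", "chinese", "tieng trung"]

theorem pvGetD_notmem (s : String) (hs : s ∉ pvAllAliases) : pvAliasToCode.getD s s = s := by
  apply PySem.Dict.getD_of_not_contains
  rw [PySem.Dict.contains_eq_decide_mem_keys, decide_eq_false_iff_not]
  simpa [pvAliasToCode, PySem.Dict.keys, pvAllAliases] using hs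

theorem pvContains_notmem (s : String) (hs : s ∉ pvAllAliases) :
    ∀ v ∈ pvAliasesA.values, PySem.Set.contains v s = false := by
  intro v hv
  rw [Bool.eq_false_iff, Ne, PySem.Set.contains_iff]
  intro hm
  apply hs
  fin_cases hv <;> rw [PySem.Set.mem_ofList] at hm <;>
    simp only [pvAllAliases, List.mem_cons] <;> simp only [List.mem_cons, List.not_mem_nil, or_false] at hm <;> tauto

theorem pvLoop_miss (nd t : String) :
    ∀ vs : List (PySem.Set String),
      (∀ v ∈ vs, PySem.Set.contains v nd = false ∨ PySem.Set.contains v t = false) →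
      pvLoopA nd t vs = (nd == t) := by
  intro vs h
  induction vs with
  | nil => rfl
  | cons v rest ih =>
      have ih' := ih (fun w hw => h w (List.mem_cons_of_mem _ hw))
      rcases h v (List.mem_cons_self) with hc | hc <;>
        simp only [pvLoopA, hc, Bool.false_and, Bool.and_false, Bool.false_eq_true,
          if_false] <;> exact ih'

theorem pvGetD_mem (s : String) (hs : s ∈ pvAllAliases) : pvAliasToCode.getD s s ∈ pvAllAliases := by
  fin_cases hs <;> decide

theorem pvBeq_false {a t : String} (ha : a ∈ pvAllAliases) (ht : t ∉ pvAllAliases) :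
    (a == t) = false ∧ (t == a) = false := by
  constructor <;> rw [beq_eq_false_iff_ne] <;> intro e
  · exact ht (e ▸ ha)
  · exact ht (e ▸ ha)

theorem pvCore (nd t : String) :
    pvLoopA nd t pvAliasesA.values =
      ((pvAliasToCode.getD nd nd) == (pvAliasToCode.getD t t)) := by
  rcases Decidable.em (nd ∈ pvAllAliases) with hd | hd <;>
    rcases Decidable.em (t ∈ pvAllAliases) with ht | ht
  · fin_cases hd <;> fin_cases ht <;> decide
  · rw [pvLoop_miss nd t _ (fun v hv => Or.inr (pvContains_notmem t ht v hv)),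
      pvGetD_notmem t ht, (pvBeq_false hd ht).1, (pvBeq_false (pvGetD_mem nd hd) ht).1]
  · rw [pvLoop_miss nd t _ (fun v hv => Or.inl (pvContains_notmem nd hd v hv)),
      pvGetD_notmem nd hd, (pvBeq_false ht hd).2, (pvBeq_false (pvGetD_mem t ht) hd).2]
  · rw [pvLoop_miss nd t _ (fun v hv => Or.inl (pvContains_notmem nd hd v hv)),
      pvGetD_notmem nd hd, pvGetD_notmem t ht]

-- core: on any two strings, A's loop over the alias groups equals B's comparison
-- of the two canonicalised strings
theorem pvCoreMain (tl : String) (d : String) (h : ¬ d = "") :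
    language_matches_py tl (some d) = language_matches_py_alt tl (some d) := by
  unfold language_matches_py language_matches_py_alt
  dsimp only
  rw [if_neg h, if_neg h]
  exact pvCore _ _

-- ===== VERDICT (by name: the statement is the Claim_ definition above) =====
theorem language_matches_py_spec : Claim_equal_language_matches_py := by
  intro tl dl _
  unfold Spec_language_matches_py
  cases dl with
  | none => rfl
  | some d =>
      by_cases h : d = ""
      · unfold language_matches_py language_matches_py_alt
        dsimp only
        rw [if_pos h, if_pos h]
      · exact pvCoreMain tl d h
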